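-- pv_equiv track=rewrite | github.com/mehboobulqadri/NUST_Admission_Assistant | retrieval/retriever.py | _filter_by_level
-- ===== SOURCE A (Python) =====
-- def _filter_by_level(results, level):
--     """Demote results that don't match the detected level."""
--     filtered = []
--     demoted = []
--
--     for r in results:
--         content = r.get("content", "").lower()
--         source = r.get("source", "").lower()
--
--         is_pg = any(
--             w in content or w in source
--             for w in [
--                 "masters",
--                 "ms ",
--                 "mba",
--                 "phd",
--                 "gat",
--                 "gre",
--                 "postgraduate",
--                 "masters faq",
--             ]
--         )
--         is_ug = any(
--             w in content or w in source
--             for w in [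
--                 "undergraduate",
--                 "net test",
--                 "entry test",
--                 "bachelor",
--                 "bs ",
--                 "be ",
--                 "bba",
--                 "fsc",
--             ]
--         )
--
--         if level == "ug" and is_pg and not is_ug:
--             demoted.append(r)
--         elif level == "pg" and is_ug and not is_pg:
--             demoted.append(r)
--         else:
--             filtered.append(r)
--
--     # Return filtered first, then demoted as fallback
--     return filtered + demoted
-- ===== SOURCE B (Python) =====
-- PG_WORDS = ["masters", "ms ", "mba", "phd", "gat", "gre", "postgraduate", "masters faq"]
-- UG_WORDS = ["undergraduate", "net test", "entry test", "bachelor", "bs ", "be ", "bba", "fsc"]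
--
--
-- def _demote(level, r):
--     """True exactly for results that mismatch the detected level."""
--     content = r.get("content", "").lower()
--     source = r.get("source", "").lower()
--     is_pg = any(w in content or w in source for w in PG_WORDS)
--     is_ug = any(w in content or w in source for w in UG_WORDS)
--     return (level == "ug" and is_pg and not is_ug) or (level == "pg" and is_ug and not is_pg)
--
--
-- def _filter_by_level(results, level):
--     """Demote results that don't match the detected level."""
--     # Stable sort on the boolean demote key: matching results keep their
--     # original order and precede the demoted ones.
--     return sorted(results, key=lambda r: _demote(level, r))
-- ===== Notes on version B (the rewrite author's own statement) =====
-- stated objective: idiomatic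
-- what changed: Replaces the manual two-bucket partition loop with a single demote(r) predicate and one stable sorted(results, key=demote) call, relying on sort stability to keep order within each bucket.
import Mathlib
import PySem

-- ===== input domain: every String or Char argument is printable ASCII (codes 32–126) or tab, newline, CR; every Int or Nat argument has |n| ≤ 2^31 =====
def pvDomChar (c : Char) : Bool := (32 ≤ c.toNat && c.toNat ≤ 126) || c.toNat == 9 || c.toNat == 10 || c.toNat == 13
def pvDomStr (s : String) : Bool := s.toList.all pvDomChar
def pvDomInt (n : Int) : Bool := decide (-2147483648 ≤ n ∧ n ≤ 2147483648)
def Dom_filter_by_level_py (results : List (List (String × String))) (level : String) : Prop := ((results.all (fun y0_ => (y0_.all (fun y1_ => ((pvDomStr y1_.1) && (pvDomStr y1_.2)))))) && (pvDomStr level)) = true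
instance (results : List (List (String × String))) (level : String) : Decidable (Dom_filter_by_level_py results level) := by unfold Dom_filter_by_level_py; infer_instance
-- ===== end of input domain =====

-- B replaces A's manual two-bucket partition loop with a single demote predicate and one
-- stable sort on that boolean key (objective: idiomatic; same return value proved below).

-- ===== PORT A =====
def pvPgWords : List String :=
  ["masters", "ms ", "mba", "phd", "gat", "gre", "postgraduate", "masters faq"]

def pvUgWords : List String :=
  ["undergraduate", "net test", "entry test", "bachelor", "bs ", "be ", "bba", "fsc"]

-- content = r.get("content", "").lower()  /  source = r.get("source", "").lower()
def pvContent (r : List (String × String)) : String :=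
  PySem.Str.lower (PySem.Dict.getD (PySem.Dict.mk r) "content" "")

def pvSource (r : List (String × String)) : String :=
  PySem.Str.lower (PySem.Dict.getD (PySem.Dict.mk r) "source" "")

def pvIsPg (r : List (String × String)) : Bool :=
  pvPgWords.any (fun w => PySem.Str.isIn w (pvContent r) || PySem.Str.isIn w (pvSource r))

def pvIsUg (r : List (String × String)) : Bool :=
  pvUgWords.any (fun w => PySem.Str.isIn w (pvContent r) || PySem.Str.isIn w (pvSource r))

-- A's loop body: append r to `filtered` (acc.1) or `demoted` (acc.2).
def pvStepA (level : String)
    (acc : List (List (String × String)) × List (List (String × String)))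
    (r : List (String × String)) :
    List (List (String × String)) × List (List (String × String)) :=
  if level == "ug" && pvIsPg r && !pvIsUg r then (acc.1, acc.2 ++ [r])
  else if level == "pg" && pvIsUg r && !pvIsPg r then (acc.1, acc.2 ++ [r])
  else (acc.1 ++ [r], acc.2)

-- A: one pass appending each result to `filtered` or `demoted`, then filtered + demoted.
def filter_by_level_py (results : List (List (String × String))) (level : String) :
    List (List (String × String)) :=
  let p := results.foldl (pvStepA level) ([], [])
  p.1 ++ p.2

-- ===== PORT B =====
-- True exactly for results that mismatch the detected level.
def pvDemote (level : String) (r : List (String × String)) : Bool :=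
  (level == "ug" && pvIsPg r && !pvIsUg r) || (level == "pg" && pvIsUg r && !pvIsPg r)

-- B: stable sort on the boolean demote key.
def filter_by_level_py_alt (results : List (List (String × String))) (level : String) :
    List (List (String × String)) :=
  PySem.List.sorted results (pvDemote level)

-- ===== PRECONDITION & SPEC =====
def Spec_filter_by_level_py (results : List (List (String × String))) (level : String) (out : List (List (String × String))) : Prop := out = filter_by_level_py_alt results level
instance (results : List (List (String × String))) (level : String) (out : List (List (String × String))) : Decidable (Spec_filter_by_level_py results level out) := by unfold Spec_filter_by_level_py; infer_instance

-- ===== CLAIM (what is proved, stated in full; the proofs are below) =====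
def Claim_equal_filter_by_level_py : Prop := ∀ (results : List (List (String × String))) (level : String), Dom_filter_by_level_py results level → Spec_filter_by_level_py results level (filter_by_level_py results level)

-- ===== LEMMAS AND PROOFS =====

-- A's branch pair collapses to the demote predicate.
theorem pvStepA_eq (level : String)
    (acc : List (List (String × String)) × List (List (String × String)))
    (r : List (String × String)) :
    pvStepA level acc r
      = if pvDemote level r then (acc.1, acc.2 ++ [r]) else (acc.1 ++ [r], acc.2) := by
  unfold pvStepA pvDemote
  by_cases h1 : (level == "ug" && pvIsPg r && !pvIsUg r) = true
  · rw [if_pos h1, if_pos (by rw [h1]; simp)]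
  · rw [if_neg h1]
    by_cases h2 : (level == "pg" && pvIsUg r && !pvIsPg r) = true
    · rw [if_pos h2, if_pos (by rw [h2]; simp)]
    · rw [if_neg h2,
        if_neg (by rw [Bool.eq_false_iff.mpr h1, Bool.eq_false_iff.mpr h2]; simp)]

-- A's loop, with accumulators generalized: it appends filter-by-bucket of the rest.
theorem pvA_loop (level : String) (xs : List (List (String × String)))
    (f t : List (List (String × String))) :
    xs.foldl (pvStepA level) (f, t)
    = (f ++ xs.filter (fun r => !pvDemote level r), t ++ xs.filter (pvDemote level)) := by
  induction xs generalizing f t with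
  | nil => simp
  | cons x rest ih =>
    rw [List.foldl_cons, pvStepA_eq]
    by_cases hd : pvDemote level x = true
    · rw [if_pos hd, ih]
      simp [hd]
    · rw [if_neg hd, ih]
      simp [Bool.eq_false_iff.mpr hd]

-- insertBy passes over a prefix it is never `before`.
theorem pvInsertBy_skip {α : Type} (before : α → α → Bool) (x : α) (F T : List α)
    (hF : ∀ y ∈ F, before x y = false) :
    PySem.List.insertBy before x (F ++ T) = F ++ PySem.List.insertBy before x T := by
  induction F with
  | nil => simp
  | cons a F ih =>
    have ha : before x a = false := hF a (by simp)
    simp [PySem.List.insertBy, ha, ih (fun y hy => hF y (by simp [hy]))]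

-- Stable sort on a boolean key is the two-bucket partition: false keys first, each
-- bucket in original order.
theorem pvSorted_bool_key {α : Type} (d : α → Bool) (xs : List α) :
    PySem.List.sorted xs d = xs.filter (fun r => !d r) ++ xs.filter d := by
  rw [PySem.List.sorted_eq_foldl_insertBy]
  suffices h : ∀ (F T : List α), (∀ y ∈ F, d y = false) → (∀ y ∈ T, d y = true) →
      xs.foldl (fun acc x => PySem.List.insertBy (fun a b => decide (d a < d b)) x acc) (F ++ T)
      = (F ++ xs.filter (fun r => !d r)) ++ (T ++ xs.filter d) by
    simpa using h [] [] (by simp) (by simp)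
  induction xs with
  | nil => intro F T _ _; simp
  | cons x rest ih =>
    intro F T hF hT
    simp only [List.foldl_cons, List.filter_cons]
    by_cases hx : d x = true
    · have : PySem.List.insertBy (fun a b => decide (d a < d b)) x (F ++ T) = (F ++ T) ++ [x] := by
        apply PySem.List.insertBy_of_forall_not_before
        intro y _; simp [Bool.lt_iff, hx]
      rw [this, List.append_assoc]
      rw [ih F (T ++ [x]) hF (by intro y hy; rcases List.mem_append.mp hy with h | h
                                 · exact hT y h
                                 · simp at h; simpa [h] using hx)]
      simp [hx]
    · have hx' : d x = false := by simpa using hx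
      have : PySem.List.insertBy (fun a b => decide (d a < d b)) x (F ++ T)
          = (F ++ [x]) ++ T := by
        rw [pvInsertBy_skip _ _ _ _ (by intro y hy; simp [Bool.lt_iff, hF y hy])]
        cases T with
        | nil => simp [PySem.List.insertBy]
        | cons t T' =>
          have : d t = true := hT t (by simp)
          simp [PySem.List.insertBy, Bool.lt_iff, hx', this]
      rw [this, ih (F ++ [x]) T (by intro y hy; rcases List.mem_append.mp hy with h | h
                                    · exact hF y h
                                    · simp at h; simpa [h] using hx') hT]
      simp [hx']

-- ===== VERDICT (by name: the statement is the Claim_ definition above) =====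
theorem filter_by_level_py_spec : Claim_equal_filter_by_level_py := by
  intro results level _
  unfold Spec_filter_by_level_py filter_by_level_py filter_by_level_py_alt
  rw [pvSorted_bool_key (pvDemote level) results, pvA_loop level results [] []]
  simp
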